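-- pv_equiv track=rewrite | github.com/dazzathewiz/plex-media-tiering | tier.py | translate_plex_path
-- ===== SOURCE A (Python) =====
-- def translate_plex_path(plex_path: str, path_map) -> str:
--     """Translate a Plex-reported path to a tier-container path.
--
--     `path_map` is a list of dicts: [{"plex": "/mnt/tank/media", "tier":
--     "/mnt/user"}, ...]. Longest-matching `plex` prefix wins; the match
--     is replaced with the corresponding `tier` prefix. Paths that don't
--     match any prefix are returned unchanged (so configs that don't need
--     translation work without touching this list).
--     """
--     if not plex_path or not path_map:
--         return plex_path or ""
--     # Sort by plex-prefix length descending so longest match wins.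
--     pairs = sorted(
--         [
--             (str(m.get("plex", "")).rstrip("/"), str(m.get("tier", "")).rstrip("/"))
--             for m in path_map if isinstance(m, dict) and m.get("plex")
--         ],
--         key=lambda t: len(t[0]),
--         reverse=True,
--     )
--     for plex_pref, tier_pref in pairs:
--         if not plex_pref:
--             continue
--         if plex_path == plex_pref:
--             return tier_pref
--         if plex_path.startswith(plex_pref + "/"):
--             return tier_pref + plex_path[len(plex_pref):]
--     return plex_path
-- ===== SOURCE B (Python) =====
-- def translate_plex_path(plex_path: str, path_map) -> str:
--     """Single pass, no sort: keep the longest matching plex prefix seen so far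
--     (strict '>' so the first of equal-length prefixes wins, like a stable
--     descending sort scanned front to back)."""
--     if not plex_path or not path_map:
--         return plex_path or ""
--     best = None  # (plex_pref, tier_pref) with the longest matching plex_pref
--     for m in path_map:
--         if not isinstance(m, dict):
--             continue
--         plex = m.get("plex", "")
--         if not plex:
--             continue
--         pref = str(plex).rstrip("/")
--         tier = str(m.get("tier", "")).rstrip("/")
--         if pref and (plex_path == pref or plex_path.startswith(pref + "/")):
--             if best is None or len(best[0]) < len(pref):
--                 best = (pref, tier)
--     if best is None:
--         return plex_path
--     pref, tier = best
--     return tier + plex_path[len(pref):]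
-- ===== Notes on version B (the rewrite author's own statement) =====
-- stated objective: simpler
-- what changed: Replaces build-list + stable sort by prefix length + scan-for-first-match with a single pass over path_map that keeps the strictly longest matching prefix (first wins on ties), returning the replacement directly.
import Mathlib
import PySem

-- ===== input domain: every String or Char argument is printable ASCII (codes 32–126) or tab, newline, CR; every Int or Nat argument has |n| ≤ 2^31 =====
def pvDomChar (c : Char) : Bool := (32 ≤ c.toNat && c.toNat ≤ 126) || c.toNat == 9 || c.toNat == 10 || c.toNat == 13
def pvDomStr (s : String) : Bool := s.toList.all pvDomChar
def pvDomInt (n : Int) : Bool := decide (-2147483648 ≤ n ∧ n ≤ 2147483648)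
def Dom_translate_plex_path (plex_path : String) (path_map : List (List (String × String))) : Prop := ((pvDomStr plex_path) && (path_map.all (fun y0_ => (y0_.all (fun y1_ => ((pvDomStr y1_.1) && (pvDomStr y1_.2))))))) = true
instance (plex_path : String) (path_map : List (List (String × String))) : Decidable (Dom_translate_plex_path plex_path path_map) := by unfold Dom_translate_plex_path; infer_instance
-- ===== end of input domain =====

-- B replaces A's build-list + stable length-descending sort + scan-for-first-match by a single
-- pass keeping the strictly longest matching prefix (first wins on ties); objective: simpler.

-- shared helpers (primitives both Pythons call)
-- m.get(k, d) on the association list: first match, default d (the type convention's dict lookup)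
def pvGetD (m : List (String × String)) (k d : String) : String := (m.lookup k).getD d
-- exact port of str.rstrip("/") for the single strip character '/'
def pvRstripSlash (cs : List Char) : List Char := (cs.reverse.dropWhile (fun c => c == '/')).reverse

-- ===== PORT A =====
-- the 'for plex_pref, tier_pref in pairs' loop (plex_path[len(plex_pref):] is drop: the index is ≥ 0)
def pvScanA (pp : List Char) : List (List Char × List Char) → List Char
  | [] => pp
  | (p, t) :: rest =>
    if p = [] then pvScanA pp rest
    else if pp = p then t
    else if PySem.Chars.startswith pp (p ++ ['/']) then t ++ pp.drop p.length
    else pvScanA pp rest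

def translate_plex_path (plex_path : String) (path_map : List (List (String × String))) : String :=
  if plex_path = "" ∨ path_map = [] then (if plex_path = "" then "" else plex_path)
  else
    let pairs := PySem.List.sorted
      ((path_map.filter (fun m => pvGetD m "plex" "" ≠ "")).map
        (fun m => (pvRstripSlash (pvGetD m "plex" "").toList, pvRstripSlash (pvGetD m "tier" "").toList)))
      (fun t => t.1.length) true
    String.ofList (pvScanA plex_path.toList pairs)

-- ===== PORT B =====
-- one loop-body step of Source B: keep the strictly longer matching prefix
def pvBStep (pp : List Char) (best : Option (List Char × List Char)) (p t : List Char) :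
    Option (List Char × List Char) :=
  if p ≠ [] ∧ (pp = p ∨ PySem.Chars.startswith pp (p ++ ['/'])) then
    match best with
    | none => some (p, t)
    | some b => if b.1.length < p.length then some (p, t) else best
  else best

def translate_plex_path_alt (plex_path : String) (path_map : List (List (String × String))) : String :=
  if plex_path = "" ∨ path_map = [] then (if plex_path = "" then "" else plex_path)
  else
    let best := path_map.foldl (fun best m =>
      let plex := pvGetD m "plex" ""
      if plex = "" then best
      else pvBStep plex_path.toList best (pvRstripSlash plex.toList)
             (pvRstripSlash (pvGetD m "tier" "").toList)) none
    match best with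
    | none => plex_path
    | some (p, t) => String.ofList (t ++ plex_path.toList.drop p.length)

-- ===== PRECONDITION & SPEC =====
def Spec_translate_plex_path (plex_path : String) (path_map : List (List (String × String))) (out : String) : Prop := out = translate_plex_path_alt plex_path path_map
instance (plex_path : String) (path_map : List (List (String × String))) (out : String) : Decidable (Spec_translate_plex_path plex_path path_map out) := by unfold Spec_translate_plex_path; infer_instance

-- ===== CLAIM (what is proved, stated in full; the proofs are below) =====
def Claim_equal_translate_plex_path : Prop := ∀ (plex_path : String) (path_map : List (List (String × String))), Dom_translate_plex_path plex_path path_map → Spec_translate_plex_path plex_path path_map (translate_plex_path plex_path path_map)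

-- ===== LEMMAS AND PROOFS =====

-- the match predicate both programs test on an (plex_pref, tier_pref) pair
def pvQ (pp : List Char) (x : List Char × List Char) : Bool :=
  decide (x.1 ≠ [] ∧ (pp = x.1 ∨ PySem.Chars.startswith pp (x.1 ++ ['/'])))

-- what A returns given the first matching pair of the sorted list
def pvFinish (pp : List Char) : Option (List Char × List Char) → List Char
  | none => pp
  | some (p, t) => if pp = p then t else t ++ pp.drop p.length

-- A's scan returns the first matching pair's replacement
theorem pvScanA_eq_find (pp : List Char) (L : List (List Char × List Char)) :
    pvScanA pp L = pvFinish pp (L.find? (pvQ pp)) := by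
  induction L with
  | nil => rfl
  | cons x rest ih =>
    obtain ⟨p, t⟩ := x
    by_cases hp : p = []
    · simp [pvScanA, pvQ, hp, ih]
    · by_cases he : pp = p
      · simp [pvScanA, pvQ, hp, he, pvFinish]
      · by_cases hs : PySem.Chars.startswith pp (p ++ ['/']) = true
        · simp [pvScanA, pvQ, hp, he, hs, pvFinish]
        · simp [pvScanA, pvQ, hp, he, hs, ih]

-- key step: inserting x into a length-descending accumulator moves find? exactly as B's best-update does
theorem pvFind_insertBy (pp : List Char) (x : List Char × List Char)
    (acc : List (List Char × List Char))
    (hpw : acc.Pairwise (fun a b => (fun t : List Char × List Char => t.1.length) b ≤ (fun t : List Char × List Char => t.1.length) a)) :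
    (PySem.List.insertBy (fun a b => decide (b.1.length < a.1.length)) x acc).find? (pvQ pp)
      = if pvQ pp x then
          (match acc.find? (pvQ pp) with
            | none => some x
            | some b => if b.1.length < x.1.length then some x else some b)
        else acc.find? (pvQ pp) := by
  induction acc with
  | nil =>
    simp only [PySem.List.insertBy, List.find?]
    cases hqx : pvQ pp x <;> simp
  | cons y ys ih =>
    rw [List.pairwise_cons] at hpw
    obtain ⟨hy, hys⟩ := hpw
    rw [PySem.List.insertBy.eq_2]
    by_cases hlt : y.1.length < x.1.length
    · -- x goes in front of y
      simp only [hlt, decide_true, if_pos]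
      cases hqx : pvQ pp x with
      | false => simp [List.find?, hqx]
      | true =>
        rw [List.find?_cons_of_pos hqx]
        cases hf : (y :: ys).find? (pvQ pp) with
        | none => rfl
        | some b =>
          have hb : b ∈ y :: ys := List.mem_of_find?_eq_some hf
          have hble : b.1.length ≤ y.1.length := by
            rcases List.mem_cons.mp hb with h | h
            · simp [h]
            · exact hy b h
          have : b.1.length < x.1.length := lt_of_le_of_lt hble hlt
          simp [this]
  
    · -- x goes after y
      simp only [hlt, decide_false, Bool.false_eq_true, if_false]
      cases hqy : pvQ pp y with
      | true =>
        -- y is the first match and stays first; x (if matching) is not longer than y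
        have hyx : ¬ (y.1.length < x.1.length) := hlt
        cases hqx : pvQ pp x <;>
          simp [List.find?, hqy, hyx]
      | false =>
        simp only [List.find?, hqy]
        simpa [List.find?, hqy] using ih hys
  
-- the fold invariant: scanning the stably-sorted accumulator = B's running best
theorem pvFold_invariant (pp : List Char) (ms : List (List Char × List Char)) :
    ∀ (acc : List (List Char × List Char)) (best : Option (List Char × List Char)),
      acc.Pairwise (fun a b => (fun t : List Char × List Char => t.1.length) b ≤ (fun t : List Char × List Char => t.1.length) a) →
      acc.find? (pvQ pp) = best →
      (ms.foldl (fun a x => PySem.List.insertBy (fun a b => decide (b.1.length < a.1.length)) x a) acc).find? (pvQ pp)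
        = ms.foldl (fun b x => pvBStep pp b x.1 x.2) best := by
  induction ms with
  | nil => intro acc best _ h; simpa using h
  | cons x rest ih =>
    intro acc best hpw hfind
    simp only [List.foldl_cons]
    refine ih _ _ (PySem.List.insertBy_pairwise_ge (fun t : List Char × List Char => t.1.length) x acc hpw) ?_
    rw [pvFind_insertBy pp x acc hpw, hfind]
    by_cases hq : (x.1 ≠ [] ∧ (pp = x.1 ∨ PySem.Chars.startswith pp (x.1 ++ ['/'])))
    · cases best with
      | none => simp [pvQ, hq, pvBStep]
      | some b =>
        by_cases hl : b.1.length < x.1.length <;>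
          simp [pvQ, hq, hl, pvBStep]
    · simp [pvQ, hq, pvBStep]

-- pvFinish agrees with B's unified replacement (pp = p makes the dropped suffix empty)
theorem pvFinish_eq (pp : List Char) (o : Option (List Char × List Char)) :
    pvFinish pp o = match o with
      | none => pp
      | some (p, t) => t ++ pp.drop p.length := by
  cases o with
  | none => rfl
  | some x =>
    obtain ⟨p, t⟩ := x
    by_cases h : pp = p
    · subst h; simp [pvFinish]
    · simp [pvFinish, h]

-- ===== VERDICT (by name: the statement is the Claim_ definition above) =====
theorem translate_plex_path_spec : Claim_equal_translate_plex_path := by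
  intro plex_path path_map _
  unfold Spec_translate_plex_path translate_plex_path translate_plex_path_alt
  by_cases hguard : plex_path = "" ∨ path_map = []
  · simp [hguard]
  · simp only [hguard, if_false]
    -- reduce B's fold over path_map to a fold over A's pairs list
    have hBfold :
        ((path_map.filter (fun m => pvGetD m "plex" "" ≠ "")).map
            (fun m => (pvRstripSlash (pvGetD m "plex" "").toList, pvRstripSlash (pvGetD m "tier" "").toList))).foldl
          (fun b x => pvBStep plex_path.toList b x.1 x.2) none
        = path_map.foldl (fun best m =>
            let plex := pvGetD m "plex" ""
            if plex = "" then best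
            else pvBStep plex_path.toList best (pvRstripSlash plex.toList)
                   (pvRstripSlash (pvGetD m "tier" "").toList)) none := by
      rw [List.foldl_map, List.foldl_filter]
      exact congrArg (fun f => List.foldl f none path_map)
        (by funext b m; by_cases hm : pvGetD m "plex" "" = "" <;> simp [hm])
    rw [pvScanA_eq_find, PySem.List.sorted_rev_eq_foldl_insertBy,
        pvFold_invariant plex_path.toList _ [] none List.Pairwise.nil rfl,
        pvFinish_eq, hBfold]
    cases hb : path_map.foldl (fun best m =>
            let plex := pvGetD m "plex" ""
            if plex = "" then best
            else pvBStep plex_path.toList best (pvRstripSlash plex.toList)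
                   (pvRstripSlash (pvGetD m "tier" "").toList)) none with
    | none => simp [String.ofList_toList]
    | some x => obtain ⟨p, t⟩ := x; rfl
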